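-- pv_equiv track=rewrite | github.com/akshatsingh05/minor_project_backend | app.py | _frequency_distribution
-- ===== SOURCE A (Python) =====
-- from collections import Counter
--
-- def _frequency_distribution(values):
--     """
--     Build a frequency distribution over auto-scaled buckets.
--     Returns {"values": [...], "frequency": [...]} suitable for bar/pie charts.
--     Bucket size scales automatically with data range for readability.
--     """
--     if not values:
--         return {"values": [], "frequency": []}
--
--     min_val = min(values)
--     max_val = max(values)
--     range_val = max_val - min_val
--
--     # Decide grouping strategy based on data spread
--     if range_val < 50:
--         base = 1
--     elif range_val < 500:
--         base = 10
--     elif range_val < 5000: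
--         base = 100
--     elif range_val < 50000:
--         base = 1000
--     else:
--         base = 10000   # for large ranges like salaries
--
--     # Apply rounding
--     rounded_values = [round(v / base) * base for v in values]
--
--     counts = Counter(rounded_values)
--     sorted_items = sorted(counts.items())
--
--     return {
--         "values": [item[0] for item in sorted_items],
--         "frequency": [item[1] for item in sorted_items]
--     }
-- ===== SOURCE B (Python) =====
-- def _frequency_distribution(values):
--     """One-pass min/max scan, table-driven bucket size, sort-then-group-runs."""
--     if not values:
--         return {"values": [], "frequency": []}
--
--     lo = hi = values[0]
--     for v in values[1:]:
--         if v < lo: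
--             lo = v
--         if v > hi:
--             hi = v
--
--     base = 10000
--     for limit, b in ((50, 1), (500, 10), (5000, 100), (50000, 1000)):
--         if hi - lo < limit:
--             base = b
--             break
--
--     rounded = sorted(round(v / base) * base for v in values)
--
--     vals = []
--     freqs = []
--     i = 0
--     n = len(rounded)
--     while i < n:
--         j = i + 1
--         while j < n and rounded[j] == rounded[i]:
--             j += 1
--         vals.append(rounded[i])
--         freqs.append(j - i)
--         i = j
--
--     return {"values": vals, "frequency": freqs}
-- ===== Notes on version B (the rewrite author's own statement) =====
-- stated objective: alternative
-- what changed: Replaces min()/max() plus a branch ladder plus Counter-then-sorted(items) by a single scan maintaining running min/max, a threshold-table loop selecting the bucket size, and sorting the rounded values once then sweeping them to emit one (value, run length) pair per maximal run of equal values.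
import Mathlib
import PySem

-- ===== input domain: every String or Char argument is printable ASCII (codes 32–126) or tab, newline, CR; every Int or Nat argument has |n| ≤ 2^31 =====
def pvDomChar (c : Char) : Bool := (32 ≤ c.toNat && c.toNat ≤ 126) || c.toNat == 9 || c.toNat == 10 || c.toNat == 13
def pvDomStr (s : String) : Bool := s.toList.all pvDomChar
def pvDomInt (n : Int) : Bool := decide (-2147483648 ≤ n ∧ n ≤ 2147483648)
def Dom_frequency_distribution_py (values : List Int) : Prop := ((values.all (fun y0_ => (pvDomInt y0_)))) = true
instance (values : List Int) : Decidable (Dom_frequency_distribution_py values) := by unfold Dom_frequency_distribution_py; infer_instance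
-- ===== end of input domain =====

-- B replaces min()/max() + the branch ladder + Counter-then-sort-items by one running min/max
-- scan, a threshold-table loop for the bucket size, and a sort-then-group-runs sweep
-- (objective: alternative decomposition, same asymptotic cost).

-- ===== PORT A =====
-- round(v / base) for an int v with |v| ≤ 2^31 and base ∈ {1,10,100,1000,10000}: exact here because
-- the double v/base is within ulp/2 < 2^-21 of the rational v/base, whose distance to the nearest
-- half-integer boundary is either 0 or ≥ 1/(2·10^4) > 2^-21; so Python's float round-half-even equals
-- round-half-even of the rational v/base, computed below with floor division and remainder.
def pyRoundDiv (v base : Int) : Int :=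
  let q := PySem.Int.floordiv v base
  let r := PySem.Int.mod v base
  if 2 * r < base then q
  else if base < 2 * r then q + 1
  else if PySem.Int.mod q 2 = 0 then q else q + 1

def frequency_distribution_py (values : List Int) : List (String × List Int) :=
  if values = [] then [("values", []), ("frequency", [])]
  else
    let min_val := (PySem.List.min? values (fun x => x)).getD 0   -- values ≠ [], so min?/max? are some
    let max_val := (PySem.List.max? values (fun x => x)).getD 0
    let range_val := max_val - min_val
    let base := if range_val < 50 then 1
      else if range_val < 500 then 10
      else if range_val < 5000 then 100
      else if range_val < 50000 then 1000
      else 10000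
    let rounded_values := values.map (fun v => pyRoundDiv v base * base)
    let counts := PySem.Dict.counter rounded_values
    -- Python sorts the (key, count) tuples lexicographically; Counter keys are distinct,
    -- so sorting by the key alone is exact
    let sorted_items := PySem.List.sorted counts.items (fun p => p.1) false
    [("values", sorted_items.map (fun p => p.1)),
     ("frequency", sorted_items.map (fun p => p.2))]

-- ===== PORT B =====
-- the `for v in values[1:]` running min/max loop of Source B
def scanLoHi (lo hi : Int) : List Int → Int × Int
  | [] => (lo, hi)
  | v :: rest => scanLoHi (if v < lo then v else lo) (if v > hi then v else hi) rest

-- the `for limit, b in …: if hi - lo < limit: base = b; break` table loop of Source B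
def pickBase (r : Int) : List (Int × Int) → Int
  | [] => 10000
  | (limit, b) :: rest => if r < limit then b else pickBase r rest

-- the `while i < n` sweep of Source B: one (value, run length) pair per maximal run of equal
-- values; the inner `while rounded[j] == rounded[i]` advance is the takeWhile/dropWhile split
def runsB : List Int → List (Int × Int)
  | [] => []
  | v :: rest =>
    (v, 1 + ((rest.takeWhile (fun x => x == v)).length : Int)) ::
      runsB (rest.dropWhile (fun x => x == v))
termination_by s => s.length
decreasing_by
  exact Nat.lt_succ_of_le (List.length_dropWhile_le _ _)

def frequency_distribution_py_alt (values : List Int) : List (String × List Int) :=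
  match values with
  | [] => [("values", []), ("frequency", [])]
  | h :: t =>
    let lohi := scanLoHi h h t
    let base := pickBase (lohi.2 - lohi.1) [(50, 1), (500, 10), (5000, 100), (50000, 1000)]
    let rounded := PySem.List.sorted ((h :: t).map (fun v => pyRoundDiv v base * base)) (fun x => x) false
    let runs := runsB rounded
    [("values", runs.map (fun p => p.1)),
     ("frequency", runs.map (fun p => p.2))]

-- ===== PRECONDITION & SPEC =====
def Spec_frequency_distribution_py (values : List Int) (out : List (String × List Int)) : Prop := out = frequency_distribution_py_alt values
instance (values : List Int) (out : List (String × List Int)) : Decidable (Spec_frequency_distribution_py values out) := by unfold Spec_frequency_distribution_py; infer_instance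

-- ===== CLAIM (what is proved, stated in full; the proofs are below) =====
def Claim_equal_frequency_distribution_py : Prop := ∀ (values : List Int), Dom_frequency_distribution_py values → Spec_frequency_distribution_py values (frequency_distribution_py values)

-- ===== LEMMAS AND PROOFS =====

-- the running min/max loop computes foldl min / foldl max
theorem scanLoHi_eq (t : List Int) : ∀ lo hi, scanLoHi lo hi t = (t.foldl min lo, t.foldl max hi) := by
  induction t with
  | nil => intro lo hi; rfl
  | cons v rest ih =>
    intro lo hi
    have h1 : (if v < lo then v else lo) = min lo v := by rw [min_def]; split_ifs <;> omega
    have h2 : (if v > hi then v else hi) = max hi v := by rw [max_def]; split_ifs <;> omega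
    simp only [scanLoHi, List.foldl_cons, ih, h1, h2]

-- facts about one run split of a ≤-sorted cons list
theorem runSplit (v : Int) (rest : List Int) (hs : (v :: rest).Pairwise (· ≤ ·)) :
    (∀ x ∈ rest.dropWhile (fun x => x == v), v < x) ∧
    (rest.dropWhile (fun x => x == v)).Pairwise (· ≤ ·) ∧
    ((v :: rest).count v : Int) = 1 + ((rest.takeWhile (fun x => x == v)).length : Int) ∧
    (∀ k, v < k → (v :: rest).count k = (rest.dropWhile (fun x => x == v)).count k) := by
  obtain ⟨hvle, hrest⟩ := List.pairwise_cons.mp hs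
  have hu_sub : (rest.dropWhile (fun x => x == v)).Sublist rest := List.dropWhile_sublist _
  have hu_pair : (rest.dropWhile (fun x => x == v)).Pairwise (· ≤ ·) :=
    List.Pairwise.sublist hu_sub hrest
  have hu_lt : ∀ x ∈ rest.dropWhile (fun x => x == v), v < x := by
    cases hu : rest.dropWhile (fun x => x == v) with
    | nil => intro x hx; simp at hx
    | cons u0 u' =>
      have hne : (u0 == v) = false := by
        have := List.head_dropWhile_not (fun x => x == v) (l := rest)
          (by rw [hu]; exact List.cons_ne_nil _ _)
        simpa [hu] using this
      have hne' : u0 ≠ v := by simpa using hne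
      have hu0mem : u0 ∈ rest := List.Sublist.mem (by rw [hu]; exact List.mem_cons_self) hu_sub
      have hvu0 : v < u0 := lt_of_le_of_ne (hvle u0 hu0mem) (Ne.symm hne')
      intro x hx
      rcases List.mem_cons.mp hx with rfl | hx'
      · exact hvu0
      · have : u0 ≤ x := (List.pairwise_cons.mp (hu ▸ hu_pair)).1 x hx'
        exact lt_of_lt_of_le hvu0 this
  refine ⟨hu_lt, hu_pair, ?_, ?_⟩
  · have hs1 : (v :: rest).count v = rest.count v + 1 := List.count_cons_self
    have hsplit : rest.count v
        = (rest.takeWhile (fun x => x == v)).count v + (rest.dropWhile (fun x => x == v)).count v := by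
      conv_lhs => rw [← List.takeWhile_append_dropWhile (p := fun x => x == v) (l := rest)]
      exact List.count_append
    have ht : (rest.takeWhile (fun x => x == v)).count v = (rest.takeWhile (fun x => x == v)).length :=
      List.count_eq_length.mpr (fun b hb => by
        have := List.mem_takeWhile_imp hb; simp at this; omega)
    have hu0 : (rest.dropWhile (fun x => x == v)).count v = 0 :=
      List.count_eq_zero.mpr (fun hmem => lt_irrefl v (hu_lt v hmem))
    rw [hs1, hsplit, ht, hu0]
    push_cast
    ring
  · intro k hk
    have hkv : (v == k) = false := by simp; omega
    have h1 : (v :: rest).count k = rest.count k := by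
      rw [List.count_cons, hkv]; simp
    have hsplit : rest.count k
        = (rest.takeWhile (fun x => x == v)).count k + (rest.dropWhile (fun x => x == v)).count k := by
      conv_lhs => rw [← List.takeWhile_append_dropWhile (p := fun x => x == v) (l := rest)]
      exact List.count_append
    have ht0 : (rest.takeWhile (fun x => x == v)).count k = 0 :=
      List.count_eq_zero.mpr (fun hmem => by
        have := List.mem_takeWhile_imp hmem; simp at this; omega)
    omega

-- on a ≤-sorted list, the sweep produces exactly the pairs (k, count of k) for the members k
theorem mem_runsB (s : List Int) :
    s.Pairwise (· ≤ ·) → ∀ p : Int × Int, (p ∈ runsB s ↔ p.1 ∈ s ∧ p.2 = (s.count p.1 : Int)) := by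
  induction s using runsB.induct with
  | case1 => intro _ p; simp [runsB]
  | case2 v rest ih =>
    intro hs p
    obtain ⟨hu_lt, hu_pair, hcv, hck⟩ := runSplit v rest hs
    have hu_sub : (rest.dropWhile (fun x => x == v)).Sublist rest := List.dropWhile_sublist _
    rw [runsB]
    simp only [List.mem_cons]
    constructor
    · rintro (rfl | hmem)
      · exact ⟨Or.inl rfl, hcv.symm⟩
      · obtain ⟨h1, h2⟩ := (ih hu_pair p).mp hmem
        exact ⟨Or.inr (List.Sublist.mem h1 hu_sub),
          by rw [h2, hck p.1 (hu_lt p.1 h1)]⟩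
    · rintro ⟨hmem, hcnt⟩
      rcases hmem with h1 | h1
      · left
        have : p.2 = 1 + ((rest.takeWhile (fun x => x == v)).length : Int) := by
          rw [hcnt, h1, hcv]
        exact Prod.ext h1 this
      · -- p.1 ∈ rest: either in the run (then = v) or after it (then v < p.1)
        conv at h1 => rw [← List.takeWhile_append_dropWhile (p := fun x => x == v) (l := rest)]
        rcases List.mem_append.mp h1 with h2 | h2
        · left
          have hp1 : p.1 = v := by have := List.mem_takeWhile_imp h2; simpa using this
          exact Prod.ext hp1 (by rw [hcnt, hp1, hcv])
        · right
          refine (ih hu_pair p).mpr ⟨h2, ?_⟩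
          rw [hcnt, hck p.1 (hu_lt p.1 h2)]

-- the first components of the sweep's pairs strictly increase
theorem pairwise_runsB (s : List Int) :
    s.Pairwise (· ≤ ·) → (runsB s).Pairwise (fun a b => a.1 < b.1) := by
  induction s using runsB.induct with
  | case1 => intro _; simp [runsB]
  | case2 v rest ih =>
    intro hs
    obtain ⟨hu_lt, hu_pair, _, _⟩ := runSplit v rest hs
    rw [runsB]
    refine List.pairwise_cons.mpr ⟨?_, ih hu_pair⟩
    intro q hq
    exact hu_lt q.1 ((mem_runsB _ hu_pair q).mp hq).1

-- the heart of the equivalence: sorted Counter items = run-grouping of the sorted list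
theorem counter_sorted_eq_runs (rv : List Int) :
    PySem.List.sorted ((PySem.Dict.counter rv).items) (fun p => p.1) false
      = runsB (PySem.List.sorted rv (fun x => x) false) := by
  have hs : (PySem.List.sorted rv (fun x => x) false).Pairwise (· ≤ ·) :=
    PySem.List.sorted_pairwise rv (fun x => x)
  have hperm : (PySem.List.sorted rv (fun x => x) false).Perm rv :=
    PySem.List.sorted_perm rv (fun x => x) false
  have hpw := pairwise_runsB _ hs
  apply PySem.List.sorted_eq_of_perm_of_pairwise_lt _ _ _ ?_ hpw
  rw [PySem.Dict.items_counter]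
  have hnd1 : (runsB (PySem.List.sorted rv (fun x => x) false)).Nodup :=
    hpw.imp (fun {a b} h he => absurd (he ▸ h) (lt_irrefl _))
  have hnd2 : ((PySem.Set.ofList rv).map (fun k => (k, (rv.count k : Int)))).Nodup :=
    List.Nodup.map (fun a b h => congrArg Prod.fst h) (PySem.Set.nodup_ofList rv)
  rw [List.perm_ext_iff_of_nodup hnd1 hnd2]
  intro p
  rw [mem_runsB _ hs p, List.mem_map]
  constructor
  · rintro ⟨h1, h2⟩
    refine ⟨p.1, (PySem.Set.mem_ofList rv p.1).mpr (hperm.mem_iff.mp h1), ?_⟩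
    have : rv.count p.1 = (PySem.List.sorted rv (fun x => x) false).count p.1 :=
      (hperm.count_eq p.1).symm
    rw [this]
    exact Prod.ext rfl h2.symm
  · rintro ⟨k, hk, rfl⟩
    refine ⟨hperm.mem_iff.mpr ((PySem.Set.mem_ofList rv k).mp hk), ?_⟩
    simp [hperm.count_eq k]

-- ===== VERDICT (by name: the statement is the Claim_ definition above) =====
theorem frequency_distribution_py_spec : Claim_equal_frequency_distribution_py := by
  intro values _
  unfold Spec_frequency_distribution_py
  cases values with
  | nil => rfl
  | cons h t =>
    unfold frequency_distribution_py frequency_distribution_py_alt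
    simp only [if_neg (List.cons_ne_nil h t), scanLoHi_eq, PySem.List.min?_id_cons,
      PySem.List.max?_id_cons, Option.getD_some, pickBase, counter_sorted_eq_runs]
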